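-- pv_equiv track=rewrite | github.com/DataRohit/Data-Structures-and-Algorithms | 02_loops/06_sum_product.py | get_sum_product
-- ===== SOURCE A (Python) =====
-- def get_sum_product(num):
--     # Initialize the sum and product
--     sum, product = 0, 1
--
--     # Loop till number becomes 0
--     while num > 0:
--         # Get the left most digit
--         rem = num % 10
--
--         # Update the sum and product
--         sum += rem
--         product *= rem
--
--         # Update the number
--         num //= 10
--
--     # Return the final sum and product
--     return sum, product
-- ===== SOURCE B (Python) =====
-- def get_sum_product(num):
--     # Non-positive numbers have no digits to visit: same empty-loop result as the while version.
--     if num <= 0: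
--         return 0, 1
--
--     # Walk the decimal string representation instead of doing arithmetic digit extraction.
--     total, product = 0, 1
--     for ch in str(num):
--         d = ord(ch) - 48
--         total += d
--         product *= d
--     return total, product
-- ===== Notes on version B (the rewrite author's own statement) =====
-- stated objective: alternative
-- what changed: Replaces the arithmetic divmod-by-10 while loop (digits visited least-significant first) with a single pass over the characters of str(num), most-significant first, accumulating sum and product from the character codes.
import Mathlib
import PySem

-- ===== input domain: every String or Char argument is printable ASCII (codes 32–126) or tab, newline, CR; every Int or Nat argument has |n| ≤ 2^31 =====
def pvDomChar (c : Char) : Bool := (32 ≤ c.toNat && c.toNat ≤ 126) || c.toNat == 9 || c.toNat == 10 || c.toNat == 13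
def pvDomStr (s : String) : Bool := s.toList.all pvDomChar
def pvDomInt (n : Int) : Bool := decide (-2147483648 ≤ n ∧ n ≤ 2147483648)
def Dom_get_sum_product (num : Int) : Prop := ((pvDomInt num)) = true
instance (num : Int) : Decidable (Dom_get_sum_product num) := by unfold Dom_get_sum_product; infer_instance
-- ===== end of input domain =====

-- B replaces A's divmod-by-10 while loop with one pass over the characters of str(num); same cost, different traversal.


-- ===== PORT A =====
-- A's while loop: state (num, sum, product), LSB digit first.
def pvGoA (num sum product : Int) : Int × Int :=
  if _h : num > 0 then
    pvGoA (PySem.Int.floordiv num 10) (sum + PySem.Int.mod num 10) (product * PySem.Int.mod num 10)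
  else (sum, product)
termination_by num.toNat
decreasing_by
  have h10 : PySem.Int.floordiv num 10 = num / 10 := PySem.Int.floordiv_eq_ediv_of_pos (by omega)
  rw [h10]
  omega

def get_sum_product (num : Int) : Int × Int := pvGoA num 0 1

-- ===== PORT B =====
def get_sum_product_alt (num : Int) : Int × Int :=
  if num ≤ 0 then (0, 1)
  else
    (PySem.Int.toStr num).toList.foldl
      (fun (sp : Int × Int) (c : Char) =>
        (sp.1 + ((c.toNat : Int) - 48), sp.2 * ((c.toNat : Int) - 48)))
      (0, 1)

-- ===== PRECONDITION & SPEC =====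
def Spec_get_sum_product (num : Int) (out : Int × Int) : Prop := out = get_sum_product_alt num
instance (num : Int) (out : Int × Int) : Decidable (Spec_get_sum_product num out) := by unfold Spec_get_sum_product; infer_instance

-- ===== CLAIM (what is proved, stated in full; the proofs are below) =====
def Claim_equal_get_sum_product : Prop := ∀ (num : Int), Dom_get_sum_product num → Spec_get_sum_product num (get_sum_product num)

-- ===== LEMMAS AND PROOFS =====

-- the MSB-first decimal digit characters, by structural recursion (no fuel)
def pvDigCh (n : Nat) : List Char :=
  if _h : n < 10 then [Nat.digitChar n]
  else pvDigCh (n / 10) ++ [Nat.digitChar (n % 10)]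
termination_by n
decreasing_by exact Nat.div_lt_self (by omega) (by omega)

lemma pvDigCh_lt (n : Nat) (h : n < 10) : pvDigCh n = [Nat.digitChar n] := by
  rw [pvDigCh]; simp [h]

lemma pvDigCh_ge (n : Nat) (h : ¬ n < 10) :
    pvDigCh n = pvDigCh (n / 10) ++ [Nat.digitChar (n % 10)] := by
  rw [pvDigCh]; simp [h]

lemma pvToDigitsCore_eq (f : Nat) : ∀ (n : Nat) (ds : List Char), n < f →
    Nat.toDigitsCore 10 f n ds = pvDigCh n ++ ds := by
  induction f with
  | zero => intro n ds h; omega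
  | succ f ih =>
    intro n ds h
    rw [Nat.toDigitsCore]
    by_cases h10 : n < 10
    · have hz : n / 10 = 0 := Nat.div_eq_of_lt h10
      have hm : n % 10 = n := Nat.mod_eq_of_lt h10
      simp [hz, hm, pvDigCh_lt n h10]
    · have hz : n / 10 ≠ 0 := by intro hc; omega
      simp only [hz]
      rw [ih (n / 10) _ (by omega), pvDigCh_ge n h10]
      simp

lemma pvToDigits_eq (n : Nat) : Nat.toDigits 10 n = pvDigCh n := by
  have := pvToDigitsCore_eq (n + 1) n [] (by omega)
  simpa [Nat.toDigits] using this

lemma pvDigitChar_val (r : Nat) (h : r < 10) : ((Nat.digitChar r).toNat : Int) - 48 = (r : Int) := by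
  interval_cases r <;> decide

-- adding to the sum / multiplying the product commutes with running A's loop
lemma pvGoA_shift_aux (k : Nat) : ∀ (m : Int), m.toNat ≤ k → ∀ (s p a b : Int),
    pvGoA m (s + a) (p * b) = ((pvGoA m s p).1 + a, (pvGoA m s p).2 * b) := by
  induction k with
  | zero =>
    intro m hm s p a b
    have h : ¬ m > 0 := by omega
    have hL : pvGoA m (s + a) (p * b) = (s + a, p * b) := by rw [pvGoA]; simp [h]
    have hR : pvGoA m s p = (s, p) := by rw [pvGoA]; simp [h]
    rw [hL, hR]
  | succ k ih =>
    intro m hm s p a b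
    by_cases h : m > 0
    · have hfd : PySem.Int.floordiv m 10 = m / 10 := PySem.Int.floordiv_eq_ediv_of_pos (by omega)
      have hk : (PySem.Int.floordiv m 10).toNat ≤ k := by rw [hfd]; omega
      have hL : pvGoA m (s + a) (p * b)
          = pvGoA (PySem.Int.floordiv m 10) (s + a + PySem.Int.mod m 10) (p * b * PySem.Int.mod m 10) := by
        rw [pvGoA]; simp [h]
      have hR : pvGoA m s p
          = pvGoA (PySem.Int.floordiv m 10) (s + PySem.Int.mod m 10) (p * PySem.Int.mod m 10) := by
        rw [pvGoA]; simp [h]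
      rw [hL, hR]
      calc pvGoA (PySem.Int.floordiv m 10) (s + a + PySem.Int.mod m 10) (p * b * PySem.Int.mod m 10)
          = pvGoA (PySem.Int.floordiv m 10) (s + PySem.Int.mod m 10 + a) (p * PySem.Int.mod m 10 * b) := by
            ring_nf
        _ = ((pvGoA (PySem.Int.floordiv m 10) (s + PySem.Int.mod m 10) (p * PySem.Int.mod m 10)).1 + a,
             (pvGoA (PySem.Int.floordiv m 10) (s + PySem.Int.mod m 10) (p * PySem.Int.mod m 10)).2 * b) :=
            ih _ hk _ _ _ _
    · have hL : pvGoA m (s + a) (p * b) = (s + a, p * b) := by rw [pvGoA]; simp [h]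
      have hR : pvGoA m s p = (s, p) := by rw [pvGoA]; simp [h]
      rw [hL, hR]

lemma pvGoA_shift (m : Int) (s p a b : Int) :
    pvGoA m (s + a) (p * b) = ((pvGoA m s p).1 + a, (pvGoA m s p).2 * b) :=
  pvGoA_shift_aux m.toNat m (le_refl _) s p a b

lemma pvCast_floordiv (n : Nat) : PySem.Int.floordiv (n : Int) 10 = ((n / 10 : Nat) : Int) := by
  rw [PySem.Int.floordiv_eq_ediv_of_pos (by omega)]
  push_cast
  rfl

lemma pvCast_mod (n : Nat) : PySem.Int.mod (n : Int) 10 = ((n % 10 : Nat) : Int) := by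
  rw [PySem.Int.mod_eq_emod_of_pos (by omega)]
  push_cast
  rfl

-- B's character fold over the MSB-first digits equals A's LSB-first loop
lemma pvFold_digCh (n : Nat) (hn : 0 < n) : ∀ (s p : Int),
    (pvDigCh n).foldl
      (fun (sp : Int × Int) (c : Char) =>
        (sp.1 + ((c.toNat : Int) - 48), sp.2 * ((c.toNat : Int) - 48)))
      (s, p) = pvGoA (n : Int) s p := by
  induction n using Nat.strong_induction_on with
  | _ n ih =>
    intro s p
    have hpos : (n : Int) > 0 := by exact_mod_cast hn
    by_cases h10 : n < 10
    · rw [pvDigCh_lt n h10]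
      simp only [List.foldl_cons, List.foldl_nil]
      rw [pvDigitChar_val n h10]
      rw [pvGoA]
      simp only [hpos, dif_pos]
      rw [pvCast_floordiv, Nat.div_eq_of_lt h10, pvCast_mod, Nat.mod_eq_of_lt h10]
      rw [pvGoA]
      simp
    · rw [pvDigCh_ge n h10, List.foldl_append]
      rw [ih (n / 10) (Nat.div_lt_self (by omega) (by omega)) (by omega) s p]
      simp only [List.foldl_cons, List.foldl_nil]
      rw [pvDigitChar_val (n % 10) (Nat.mod_lt n (by omega))]
      have hR : pvGoA (n : Int) s p
          = pvGoA (PySem.Int.floordiv (n : Int) 10) (s + PySem.Int.mod (n : Int) 10)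
              (p * PySem.Int.mod (n : Int) 10) := by
        rw [pvGoA]; simp only [hpos, dif_pos]
      rw [hR, pvCast_floordiv, pvCast_mod, pvGoA_shift]

-- ===== VERDICT (by name: the statement is the Claim_ definition above) =====
theorem get_sum_product_spec : Claim_equal_get_sum_product := by
  intro num _
  unfold Spec_get_sum_product get_sum_product get_sum_product_alt
  by_cases hle : num ≤ 0
  · rw [if_pos hle, pvGoA]
    simp [show ¬ num > 0 by omega]
  · rw [if_neg hle]
    have hpos : 0 < num := by omega
    have hn : num = ((num.toNat : Nat) : Int) := by omega
    rw [PySem.Int.toList_toStr]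
    rw [hn]
    unfold PySem.Int.toChars
    rw [if_neg (by omega)]
    simp only [Int.toNat_natCast]
    rw [pvToDigits_eq]
    exact (pvFold_digCh num.toNat (by omega) 0 1).symm
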